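-- pv_equiv track=rewrite | github.com/Yousanflics/leetcode_interview | Job/TikTok/326OA-7.py | getMinAdjustments
-- ===== SOURCE A (Python) =====
-- import math
--
-- def getMinAdjustments(videoScores, maxAdjustments):
--     # 二分查找的下界和上界
--     left, right = 1, max(videoScores)
--     result = right  # 初始化结果为上界
--
--     while left <= right:
--         mid = (left + right) // 2
--
--         # 计算使用mid作为x时需要的总调整次数
--         adjustments_needed = 0
--         for score in videoScores:
--             # 对每个分数，计算需要多少次调整（向上取整）
--             adjustments_needed += math.ceil(score / mid)
--
--         if adjustments_needed <= maxAdjustments: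
--             # 如果当前mid可行，尝试更小的值
--             result = mid
--             right = mid - 1
--         else:
--             # 如果当前mid不可行，尝试更大的值
--             left = mid + 1
--
--     return result
-- ===== SOURCE B (Python) =====
-- def getMinAdjustments(videoScores, maxAdjustments):
--     mx = max(videoScores)
--
--     def feasible(d):
--         return sum(-(-s // d) for s in videoScores) <= maxAdjustments
--
--     def search(lo, hi):
--         if lo > hi:
--             return None
--         mid = (lo + hi) // 2
--         if feasible(mid):
--             found = search(lo, mid - 1)
--             return mid if found is None else found
--         return search(mid + 1, hi)
--
--     ans = search(1, mx)
--     return mx if ans is None else ans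
-- ===== Notes on version B (the rewrite author's own statement) =====
-- stated objective: alternative
-- what changed: Same bisection re-decomposed: an iterative loop mutating left/right/result with a best-so-far accumulator becomes a recursive divide-and-conquer search returning Optional (None = no feasible divisor, no accumulator), and float math.ceil(s/d) becomes exact integer ceiling division -(-s//d).
import Mathlib
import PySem

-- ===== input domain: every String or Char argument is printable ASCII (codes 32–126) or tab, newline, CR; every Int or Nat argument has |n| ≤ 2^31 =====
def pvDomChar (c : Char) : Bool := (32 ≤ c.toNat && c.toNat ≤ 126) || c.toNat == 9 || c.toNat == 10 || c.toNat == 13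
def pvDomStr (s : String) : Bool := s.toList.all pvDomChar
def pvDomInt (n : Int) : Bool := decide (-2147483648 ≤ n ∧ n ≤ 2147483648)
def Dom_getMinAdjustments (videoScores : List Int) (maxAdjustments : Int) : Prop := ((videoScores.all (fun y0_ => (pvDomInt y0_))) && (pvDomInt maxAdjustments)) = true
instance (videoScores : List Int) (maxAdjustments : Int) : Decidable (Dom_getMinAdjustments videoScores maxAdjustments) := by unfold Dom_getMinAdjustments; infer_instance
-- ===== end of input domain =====

-- B re-decomposes A's search: recursive divide-and-conquer returning Optional instead of the
-- iterative left/right/result state machine, and exact integer ceiling division -(-s // d)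
-- instead of float math.ceil(s / d); objective: alternative, same cost.

-- ===== PORT A =====
-- math.ceil(s / d): exact integer ceiling for 0 < d; exact on Dom (|s| ≤ 2^31, so the float
-- division followed by ceil equals the exact ceiling).
def pvCeil (s d : Int) : Int := -(PySem.Int.floordiv (-s) d)

-- the inner 'for score in videoScores: adjustments_needed += math.ceil(score / mid)' loop
def pvCeilSum (vs : List Int) (d : Int) : Int := vs.foldl (fun acc s => acc + pvCeil s d) 0

-- A's while-loop over (left, right, result)
def pvALoop (vs : List Int) (m l r res : Int) : Int :=
  if h : l ≤ r then
    let mid := PySem.Int.floordiv (l + r) 2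
    if pvCeilSum vs mid ≤ m then pvALoop vs m l (mid - 1) mid
    else pvALoop vs m (mid + 1) r res
  else res
termination_by (r + 1 - l).toNat
decreasing_by
  · obtain ⟨h1, h2⟩ := PySem.Int.floordiv_two_mid_bounds h; omega
  · obtain ⟨h1, h2⟩ := PySem.Int.floordiv_two_mid_bounds h; omega

def getMinAdjustments (videoScores : List Int) (maxAdjustments : Int) : Int :=
  -- max(videoScores) raises ValueError on []; Pre_ excludes the empty list
  let mx := (PySem.List.max? videoScores (fun y => y)).getD 0
  pvALoop videoScores maxAdjustments 1 mx mx

-- ===== PORT B =====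
-- '-(-s // d)': exact integer ceiling division, no floats
def pvCeilB (s d : Int) : Int := -(PySem.Int.floordiv (-s) d)

-- 'feasible(d)': sum(-(-s // d) for s in videoScores) <= maxAdjustments
def pvFeasible (vs : List Int) (m d : Int) : Bool :=
  (vs.map (fun s => pvCeilB s d)).sum ≤ m

-- 'search(lo, hi)': recursive divide and conquer, None = no feasible divisor in [lo, hi]
def pvSearch (vs : List Int) (m lo hi : Int) : Option Int :=
  if h : lo > hi then none
  else
    let mid := PySem.Int.floordiv (lo + hi) 2
    if pvFeasible vs m mid then
      match pvSearch vs m lo (mid - 1) with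
      | none => some mid
      | some found => some found
    else pvSearch vs m (mid + 1) hi
termination_by (hi + 1 - lo).toNat
decreasing_by
  · obtain ⟨h1, h2⟩ := PySem.Int.floordiv_two_mid_bounds (by omega : lo ≤ hi); omega
  · obtain ⟨h1, h2⟩ := PySem.Int.floordiv_two_mid_bounds (by omega : lo ≤ hi); omega

def getMinAdjustments_alt (videoScores : List Int) (maxAdjustments : Int) : Int :=
  let mx := (PySem.List.max? videoScores (fun y => y)).getD 0
  match pvSearch videoScores maxAdjustments 1 mx with
  | none => mx
  | some ans => ans

-- ===== PRECONDITION & SPEC =====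
-- Pre_ excludes only the empty list, on which A raises ValueError in max().
def Pre_getMinAdjustments (videoScores : List Int) (maxAdjustments : Int) : Prop :=
  videoScores ≠ []
instance (videoScores : List Int) (maxAdjustments : Int) : Decidable (Pre_getMinAdjustments videoScores maxAdjustments) := by unfold Pre_getMinAdjustments; infer_instance

def pvWitness_getMinAdjustments : List Int × Int := ([3, 1, 4], 5)

def Spec_getMinAdjustments (videoScores : List Int) (maxAdjustments : Int) (out : Int) : Prop := out = getMinAdjustments_alt videoScores maxAdjustments
instance (videoScores : List Int) (maxAdjustments : Int) (out : Int) : Decidable (Spec_getMinAdjustments videoScores maxAdjustments out) := by unfold Spec_getMinAdjustments; infer_instance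

-- ===== CLAIM (what is proved, stated in full; the proofs are below) =====
def Claim_equal_getMinAdjustments : Prop := ∀ (videoScores : List Int) (maxAdjustments : Int), Dom_getMinAdjustments videoScores maxAdjustments → Pre_getMinAdjustments videoScores maxAdjustments → Spec_getMinAdjustments videoScores maxAdjustments (getMinAdjustments videoScores maxAdjustments)

-- ===== LEMMAS AND PROOFS =====

-- A's accumulator loop computes the same total B's sum(...) computes
theorem pvCeilSum_foldl_general (vs : List Int) (d a : Int) :
    vs.foldl (fun acc s => acc + pvCeil s d) a = a + (vs.map (fun s => pvCeil s d)).sum := by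
  induction vs generalizing a with
  | nil => simp
  | cons x t ih => simp [List.foldl_cons, ih (a + pvCeil x d)]; ring

theorem pvCeilSum_eq_feas (vs : List Int) (m d : Int) :
    (pvCeilSum vs d ≤ m) = (pvFeasible vs m d = true) := by
  unfold pvCeilSum pvFeasible pvCeilB
  rw [pvCeilSum_foldl_general vs d 0, zero_add]
  simp [pvCeil]

-- the iterative loop with a best-so-far accumulator equals the recursive Optional search
theorem pvALoop_eq_search (vs : List Int) (m : Int) :
    ∀ (n : Nat) (l r res : Int), (r + 1 - l).toNat = n →
    pvALoop vs m l r res =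
      (match pvSearch vs m l r with
       | none => res
       | some v => v) := by
  intro n
  induction n using Nat.strong_induction_on with
  | _ n ih =>
    intro l r res hn
    rw [pvALoop, pvSearch]
    by_cases h : l ≤ r
    · rw [dif_pos h, dif_neg (by omega : ¬ l > r)]
      obtain ⟨hm1, hm2⟩ := PySem.Int.floordiv_two_mid_bounds h
      set mid := PySem.Int.floordiv (l + r) 2 with hmid
      by_cases hfeas : pvCeilSum vs mid ≤ m
      · rw [if_pos hfeas, if_pos (by rw [← pvCeilSum_eq_feas]; exact hfeas)]
        rw [ih (mid - 1 + 1 - l).toNat (by omega) l (mid - 1) mid rfl]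
        cases pvSearch vs m l (mid - 1) <;> simp
      · rw [if_neg hfeas, if_neg (by rw [← pvCeilSum_eq_feas]; exact hfeas)]
        exact ih (r + 1 - (mid + 1)).toNat (by omega) (mid + 1) r res rfl
    · rw [dif_neg h, dif_pos (by omega : l > r)]

-- ===== VERDICT (by name: the statement is the Claim_ definition above) =====
theorem getMinAdjustments_spec : Claim_equal_getMinAdjustments := by
  intro vs m hdom hne
  unfold Spec_getMinAdjustments getMinAdjustments getMinAdjustments_alt
  cases hmax : PySem.List.max? vs (fun y => y) with
  | none => exact absurd ((PySem.List.max?_eq_none_iff vs (fun y => y)).mp hmax) hne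
  | some mx =>
    simp only [Option.getD_some]
    rw [pvALoop_eq_search vs m (mx + 1 - 1).toNat 1 mx mx rfl]
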